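-- pv_equiv track=rewrite | github.com/richardpon/mypractice | leetcode/53_maximum_subarray/maximum_subarray.py | max_for_size
-- ===== SOURCE A (Python) =====
-- from typing import List
--
-- def max_for_size(nums: List[int], size: int) -> int:
--
--     cur_sum = sum(nums[0:size])
--     max_sum = cur_sum
--
--     #slide window
--     for i in range(0, len(nums) - size):
--         cur_sum -= nums[i]  # subtract prev
--         cur_sum += nums[i + size] #add next
--
--         if cur_sum > max_sum:
--             max_sum = cur_sum
--
--     return max_sum
-- ===== SOURCE B (Python) =====
-- from typing import List
--
-- def max_for_size(nums: List[int], size: int) -> int: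
--     prefix = [0]
--     for x in nums:
--         prefix.append(prefix[-1] + x)
--     return max(prefix[j + size] - prefix[j] for j in range(len(nums) - size + 1))
-- ===== Notes on version B (the rewrite author's own statement) =====
-- stated objective: alternative
-- what changed: B builds a prefix-sum table once and returns the maximum of prefix[j+size]-prefix[j] over all window starts, instead of A's incrementally slid running window sum; Pre_ excludes size < 0 (A raises IndexError) and size > len(nums), where A's sum(nums[0:size]) silently truncates to the whole-list sum while the natural B raises on max of an empty sequence.
-- outside the precondition, e.g. on max_for_size([1, 2], 5): A returns 3, B raises ValueError
import Mathlib
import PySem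

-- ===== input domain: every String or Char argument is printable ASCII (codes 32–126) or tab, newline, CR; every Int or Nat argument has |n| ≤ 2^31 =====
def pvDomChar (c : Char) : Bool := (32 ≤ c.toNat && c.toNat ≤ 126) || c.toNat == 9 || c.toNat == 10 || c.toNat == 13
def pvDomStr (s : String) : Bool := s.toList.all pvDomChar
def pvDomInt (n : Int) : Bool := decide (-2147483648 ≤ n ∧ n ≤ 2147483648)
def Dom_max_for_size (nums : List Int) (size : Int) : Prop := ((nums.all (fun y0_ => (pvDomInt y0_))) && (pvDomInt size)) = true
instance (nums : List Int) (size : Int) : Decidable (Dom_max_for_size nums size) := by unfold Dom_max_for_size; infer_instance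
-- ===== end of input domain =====

-- B replaces A's incrementally slid running window sum by a prefix-sum table whose window differences are maxed once; objective: alternative (same O(n) cost).

-- ===== PORT A =====
-- literal port of A: cur_sum = sum(nums[0:size]); slide the window over range(0, len(nums)-size), keeping the max
def max_for_size (nums : List Int) (size : Int) : Int :=
  let cur0 := (PySem.List.slice nums (some 0) (some size)).sum
  ((PySem.List.pyRange 0 ((nums.length : Int) - size) 1).foldl
      (fun (st : Int × Int) i =>
        let cur := st.1 - PySem.List.pyGetD nums i 0 + PySem.List.pyGetD nums (i + size) 0
        (cur, if cur > st.2 then cur else st.2))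
      (cur0, cur0)).2

-- ===== PORT B =====
-- literal port of B: build the prefix-sum list, then max(prefix[j+size]-prefix[j] for j in range(len(nums)-size+1)).
-- Python's max raises on an empty sequence (excluded by Pre_); the port's '.getD 0' is only the Option unwrapping.
def max_for_size_alt (nums : List Int) (size : Int) : Int :=
  let pre := nums.foldl (fun p x => p ++ [PySem.List.pyGetD p (-1) 0 + x]) [0]
  let ws := (PySem.List.pyRange 0 ((nums.length : Int) - size + 1) 1).map
      (fun j => PySem.List.pyGetD pre (j + size) 0 - PySem.List.pyGetD pre j 0)
  (PySem.List.max? ws (fun y => y)).getD 0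

-- ===== PRECONDITION & SPEC =====
-- Pre_ excludes size < 0, on which A always raises IndexError, and size > len(nums), where A's
-- sum(nums[0:size]) silently truncates to the whole-list sum while the natural B raises ValueError
-- on max of an empty sequence.
def Pre_max_for_size (nums : List Int) (size : Int) : Prop := 0 ≤ size ∧ size ≤ (nums.length : Int)
instance (nums : List Int) (size : Int) : Decidable (Pre_max_for_size nums size) := by unfold Pre_max_for_size; infer_instance
def pvWitness_max_for_size : List Int × Int := ([1, -2, 3], 2)

def Spec_max_for_size (nums : List Int) (size : Int) (out : Int) : Prop := out = max_for_size_alt nums size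
instance (nums : List Int) (size : Int) (out : Int) : Decidable (Spec_max_for_size nums size out) := by unfold Spec_max_for_size; infer_instance

-- ===== CLAIM (what is proved, stated in full; the proofs are below) =====
def Claim_equal_max_for_size : Prop := ∀ (nums : List Int) (size : Int), Dom_max_for_size nums size → Pre_max_for_size nums size → Spec_max_for_size nums size (max_for_size nums size)

-- ===== LEMMAS AND PROOFS =====

-- prefix sum of the first k elements
def pvP (nums : List Int) (k : Nat) : Int := (nums.take k).sum

-- running sums of xs starting from t (the tail of B's prefix list)
def pvScan (t : Int) : List Int → List Int
  | [] => []
  | x :: xs => (t + x) :: pvScan (t + x) xs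

lemma pvP_succ (nums : List Int) (k : Nat) (hk : k < nums.length) :
    pvP nums (k + 1) = pvP nums k + nums.getD k 0 := by
  unfold pvP
  rw [List.take_add_one, List.sum_append, List.getElem?_eq_getElem hk]
  simp [List.getD, List.getElem?_eq_getElem hk]

lemma pvScan_getElem? (xs : List Int) (t : Int) (k : Nat) (hk : k < xs.length) :
    (pvScan t xs)[k]? = some (t + (xs.take (k + 1)).sum) := by
  induction xs generalizing t k with
  | nil => simp at hk
  | cons x xs ih =>
    cases k with
    | zero => simp [pvScan]
    | succ k =>
      have hk' : k < xs.length := by simpa using hk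
      simp [pvScan, ih _ _ hk', add_assoc]

lemma pvBuild (xs : List Int) : ∀ (q : List Int) (t : Int),
    xs.foldl (fun p x => p ++ [PySem.List.pyGetD p (-1) 0 + x]) (q ++ [t])
      = q ++ [t] ++ pvScan t xs := by
  induction xs with
  | nil => intro q t; simp [pvScan]
  | cons x xs ih =>
    intro q t
    simp only [List.foldl_cons, PySem.List.pyGetD_neg_one_append_singleton]
    rw [show (q ++ [t]) ++ [t + x] = (q ++ [t]) ++ [t + x] from rfl, ih (q ++ [t]) (t + x)]
    simp [pvScan]

lemma prefix_getD (nums : List Int) (k : Nat) (hk : k ≤ nums.length) :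
    ((0 : Int) :: pvScan 0 nums).getD k 0 = pvP nums k := by
  cases k with
  | zero => simp [pvP]
  | succ k =>
    have hk' : k < nums.length := by omega
    simp [List.getD, pvScan_getElem? nums 0 k hk', pvP]

lemma pvMaxIf (b w : Int) : max b w = if w > b then w else b := by
  simp [max_def]; split_ifs <;> omega

-- The core equivalence: A's slid (cur, max) fold equals the running-max fold of prefix differences, one index ahead.
lemma pvMain (nums : List Int) (s : Nat) :
    ∀ (l i : Nat) (mx : Int), i + l + s ≤ nums.length →
    ((PySem.List.pyRange (i : Int) ((i : Int) + (l : Int)) 1).foldl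
        (fun (st : Int × Int) iv =>
          let cur := st.1 - PySem.List.pyGetD nums iv 0 + PySem.List.pyGetD nums (iv + (s : Int)) 0
          (cur, if cur > st.2 then cur else st.2))
        (pvP nums (i + s) - pvP nums i, mx)).2
    = (PySem.List.pyRange ((i : Int) + 1) ((i : Int) + 1 + (l : Int)) 1).foldl
        (fun best j =>
          let w := pvP nums ((j + (s : Int)).toNat) - pvP nums j.toNat
          if w > best then w else best)
        mx := by
  intro l
  induction l with
  | zero =>
    intro i mx _
    rw [PySem.List.pyRange_one_eq_nil (by simp), PySem.List.pyRange_one_eq_nil (by simp)]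
    rfl
  | succ l ih =>
    intro i mx hb
    have hi : i < nums.length := by omega
    have his : i + s < nums.length := by omega
    rw [PySem.List.pyRange_one_cons (a := (i : Int)) (b := (i : Int) + ((l + 1 : Nat) : Int))
          (by push_cast; omega),
        PySem.List.pyRange_one_cons (a := (i : Int) + 1) (b := (i : Int) + 1 + ((l + 1 : Nat) : Int))
          (by push_cast; omega)]
    simp only [List.foldl_cons]
    have hgi : PySem.List.pyGetD nums (i : Int) 0 = nums.getD i 0 := PySem.List.pyGetD_natCast ..
    have hgis : PySem.List.pyGetD nums ((i : Int) + (s : Int)) 0 = nums.getD (i + s) 0 := by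
      rw [show ((i : Int) + (s : Int)) = ((i + s : Nat) : Int) by push_cast; ring]
      exact PySem.List.pyGetD_natCast ..
    have hcur : pvP nums (i + s) - pvP nums i - nums.getD i 0 + nums.getD (i + s) 0
        = pvP nums (i + 1 + s) - pvP nums (i + 1) := by
      have h1 := pvP_succ nums i hi
      have h2 := pvP_succ nums (i + s) his
      rw [show i + 1 + s = i + s + 1 by omega, h1, h2]; ring
    have hw1 : ((i : Int) + 1 + (s : Int)).toNat = i + 1 + s := by omega
    have hw2 : ((i : Int) + 1).toNat = i + 1 := by omega
    simp only [hgi, hgis, hcur, hw1, hw2]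
    have ihx := ih (i + 1) (if pvP nums (i + 1 + s) - pvP nums (i + 1) > mx then
        pvP nums (i + 1 + s) - pvP nums (i + 1) else mx) (by omega)
    have e1 : ((i + 1 : Nat) : Int) = (i : Int) + 1 := by push_cast; ring
    have e2 : ((i + 1 : Nat) : Int) + (l : Int) = (i : Int) + ((l + 1 : Nat) : Int) := by push_cast; ring
    have e3 : ((i + 1 : Nat) : Int) + 1 + (l : Int) = (i : Int) + 1 + ((l + 1 : Nat) : Int) := by
      push_cast; ring
    rw [e2, e3] at ihx
    rw [e1] at ihx
    exact ihx

-- ===== VERDICT (by name: the statement is the Claim_ definition above) =====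
theorem max_for_size_spec : Claim_equal_max_for_size := by
  intro nums size _ hpre
  obtain ⟨hpre, hgt⟩ := hpre
  unfold Spec_max_for_size max_for_size max_for_size_alt
  have hsize : size = (size.toNat : Int) := (Int.toNat_of_nonneg hpre).symm
  set s : Nat := size.toNat with hs
  have hsn : s ≤ nums.length := by omega
  have hbuild : nums.foldl (fun p x => p ++ [PySem.List.pyGetD p (-1) 0 + x]) [0]
      = (0 : Int) :: pvScan 0 nums := by
    have := pvBuild nums [] 0
    simpa using this
  have hslice : (PySem.List.slice nums (some 0) (some size)).sum = pvP nums s := by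
    rw [PySem.List.slice_toNat nums (le_refl 0) hpre]
    simp only [pvP, Int.toNat_zero, Nat.sub_zero, List.drop_zero]
    rfl
  simp only [hbuild, hslice]
  have hgd : ∀ (k : Nat), k ≤ nums.length →
      PySem.List.pyGetD ((0 : Int) :: pvScan 0 nums) ((k : Nat) : Int) 0 = pvP nums k := by
    intro k hk
    rw [PySem.List.pyGetD_natCast]
    exact prefix_getD nums k hk
  -- abbreviate B's window function
  set f : Int → Int := fun j => PySem.List.pyGetD ((0 : Int) :: pvScan 0 nums) (j + size) 0
      - PySem.List.pyGetD ((0 : Int) :: pvScan 0 nums) j 0 with hf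
  -- split off j = 0 of B's range and turn max? of the mapped list into a running-max fold
  have hcons : PySem.List.pyRange 0 ((nums.length : Int) - size + 1) 1
      = 0 :: PySem.List.pyRange 1 ((nums.length : Int) - size + 1) 1 := by
    have := PySem.List.pyRange_one_cons (a := (0 : Int)) (b := (nums.length : Int) - size + 1)
      (by omega)
    simpa using this
  have hf0 : f 0 = pvP nums s := by
    rw [hf]
    simp only [zero_add]
    rw [hsize, hgd s hsn, PySem.List.pyGetD_zero_cons]
    ring
  rw [hcons]
  simp only [List.map_cons]
  rw [PySem.List.max?_id_cons]
  simp only [Option.getD_some, List.foldl_map, hf0]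
  -- rewrite the running max as A-shaped if-fold on prefix differences
  have hcong : (PySem.List.pyRange 1 ((nums.length : Int) - size + 1) 1).foldl
        (fun best j => max best (f j)) (pvP nums s)
      = (PySem.List.pyRange 1 ((nums.length : Int) - size + 1) 1).foldl
        (fun best j =>
          let w := pvP nums ((j + (s : Nat) : Int).toNat) - pvP nums j.toNat
          if w > best then w else best)
        (pvP nums s) := by
    apply PySem.List.foldl_congr_mem
    intro acc j hj
    rw [PySem.List.mem_pyRange_one] at hj
    have hj0 : 0 ≤ j := by omega
    have hjle : j.toNat ≤ nums.length := by omega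
    simp only [hf]
    rw [pvMaxIf]
    rw [show j = ((j.toNat : Nat) : Int) from (Int.toNat_of_nonneg hj0).symm, hsize,
      show ((j.toNat : Int) + ((s : Nat) : Int)) = ((j.toNat + s : Nat) : Int) by push_cast; ring,
      hgd j.toNat hjle, hgd (j.toNat + s) (by omega)]
    rw [Int.toNat_natCast, Int.toNat_natCast]
  rw [hcong]
  have hp0 : pvP nums 0 = 0 := by simp [pvP]
  have hmain := pvMain nums s (nums.length - s) 0 (pvP nums s) (by omega)
  simp only [Nat.cast_zero, zero_add, hp0, sub_zero] at hmain
  rw [show ((nums.length - s : Nat) : Int) = (nums.length : Int) - (s : Int) from by omega] at hmain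
  rw [show (1 : Int) + ((nums.length : Int) - (s : Int)) = (nums.length : Int) - (s : Int) + 1
    from by ring] at hmain
  rw [hsize]
  exact hmain
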